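-- pv_equiv track=rewrite | github.com/Giannicl/python_projects | python_module10/ex4/decorator_mastery.py | validate_mage_name
-- ===== SOURCE A (Python) =====
-- def validate_mage_name(name: str) -> bool:
--     size: int = 0
--     for character in name:
--         size: int = size + 1
--         is_space: bool = character == " "
--         is_lower_case: bool = "a" <= character <= "z"
--         is_upper_case: bool = "A" <= character <= "Z"
--         if not (is_space or is_lower_case or is_upper_case):
--             return False
--     if size < 3:
--         return False
--     return True
-- ===== SOURCE B (Python) =====
-- import re
--
-- def validate_mage_name(name: str) -> bool:
--     return re.fullmatch(r"[A-Za-z ]{3,}", name) is not None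
-- ===== Notes on version B (the rewrite author's own statement) =====
-- stated objective: idiomatic
-- what changed: Replaced the explicit per-character loop with manual counter and early return by a single anchored regex fullmatch over the class [A-Za-z ] with a {3,} length quantifier.
import Mathlib
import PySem

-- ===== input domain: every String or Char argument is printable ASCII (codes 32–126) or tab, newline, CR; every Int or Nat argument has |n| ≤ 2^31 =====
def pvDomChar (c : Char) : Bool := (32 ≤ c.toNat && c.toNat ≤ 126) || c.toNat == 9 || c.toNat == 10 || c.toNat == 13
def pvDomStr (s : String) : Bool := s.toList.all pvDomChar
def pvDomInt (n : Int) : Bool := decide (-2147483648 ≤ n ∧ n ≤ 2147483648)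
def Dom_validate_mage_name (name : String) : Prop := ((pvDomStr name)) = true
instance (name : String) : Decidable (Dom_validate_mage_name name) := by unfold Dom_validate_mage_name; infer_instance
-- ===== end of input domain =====

-- B replaces A's explicit counting loop with early return by one anchored regex
-- fullmatch ([A-Za-z ]{3,}); ported as "length ≥ 3 and every char in the class".

-- ===== PORT A =====
-- the loop: walk the characters, counting, returning False on the first bad one
def validate_mage_name_go (cs : List Char) (size : Int) : Bool :=
  match cs with
  | [] => if size < 3 then false else true
  | character :: rest =>
    let size := size + 1
    let is_space : Bool := character == ' '
    let is_lower_case : Bool := 'a' ≤ character && character ≤ 'z'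
    let is_upper_case : Bool := 'A' ≤ character && character ≤ 'Z'
    if !(is_space || is_lower_case || is_upper_case) then false
    else validate_mage_name_go rest size

def validate_mage_name (name : String) : Bool :=
  validate_mage_name_go name.toList 0

-- ===== PORT B =====
-- re.fullmatch(r"[A-Za-z ]{3,}", name) is not None:
-- the whole string matches the class and has length at least 3
def pvMageClass (c : Char) : Bool :=
  c == ' ' || ('a' ≤ c && c ≤ 'z') || ('A' ≤ c && c ≤ 'Z')

def validate_mage_name_alt (name : String) : Bool :=
  decide (3 ≤ name.toList.length) && name.toList.all pvMageClass

-- ===== PRECONDITION & SPEC =====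
def Spec_validate_mage_name (name : String) (out : Bool) : Prop := out = validate_mage_name_alt name
instance (name : String) (out : Bool) : Decidable (Spec_validate_mage_name name out) := by unfold Spec_validate_mage_name; infer_instance

-- ===== CLAIM (what is proved, stated in full; the proofs are below) =====
def Claim_equal_validate_mage_name : Prop := ∀ (name : String), Dom_validate_mage_name name → Spec_validate_mage_name name (validate_mage_name name)

-- ===== LEMMAS AND PROOFS =====
theorem validate_mage_name_go_eq (cs : List Char) (size : Int) :
    validate_mage_name_go cs size
      = (decide (3 ≤ size + cs.length) && cs.all pvMageClass) := by
  induction cs generalizing size with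
  | nil =>
    simp [validate_mage_name_go]
    by_cases h : size < 3 <;> simp [h] <;> omega
  | cons c rest ih =>
    simp only [validate_mage_name_go, ih, pvMageClass, List.all_cons]
    by_cases h : (c == ' ' || ('a' ≤ c && c ≤ 'z') || ('A' ≤ c && c ≤ 'Z')) = true
    · simp [h]
      congr 1
      simp
      omega
    · simp [h]

-- ===== VERDICT (by name: the statement is the Claim_ definition above) =====
theorem validate_mage_name_spec : Claim_equal_validate_mage_name := by
  intro name _
  unfold Spec_validate_mage_name validate_mage_name validate_mage_name_alt
  rw [validate_mage_name_go_eq]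
  congr 1
  simp
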